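-- pv_equiv track=rewrite | github.com/Castr0LeR0b0t/LordOfLight | convert_seigneur_to_md.py | join_paragraph
-- ===== SOURCE A (Python) =====
-- def join_paragraph(lines: list[str]) -> str:
--     """Recolle les lignes en un seul paragraphe propre."""
--     parts: list[str] = []
--     for raw in lines:
--         s = raw.strip()
--         if not s:
--             continue
--         if not parts:
--             parts.append(s)
--             continue
--
--         prev = parts[-1]
--         # Gestion simple des césures : mot coupé avec un tiret en fin de ligne
--         if prev.endswith("-"):
--             parts[-1] = prev[:-1] + s
--         else:
--             parts[-1] = prev + " " + s
--
--     return parts[0] if parts else ""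
-- ===== SOURCE B (Python) =====
-- def join_paragraph(lines: list[str]) -> str:
--     """Recolle les lignes en un seul paragraphe propre."""
--     cleaned = [s for s in (l.strip() for l in lines) if s]
--     n = len(cleaned)
--     pieces = []
--     for i, s in enumerate(cleaned):
--         if i == n - 1:
--             pieces.append(s)            # last line kept verbatim (trailing '-' stays)
--         elif s.endswith('-'):
--             pieces.append(s[:-1])       # hyphenated break: glue without separator
--         else:
--             pieces.append(s + ' ')
--     return ''.join(pieces)
-- ===== Notes on version B (the rewrite author's own statement) =====
-- stated objective: faster
-- what changed: B replaces A's mutating accumulator (repeatedly rewriting parts[-1] and deciding the glue from the accumulated string's last character) by a clean-then-join pipeline: strip/filter once, derive each line's own separator from its trailing character and position, and ''.join the pieces.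
import Mathlib
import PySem

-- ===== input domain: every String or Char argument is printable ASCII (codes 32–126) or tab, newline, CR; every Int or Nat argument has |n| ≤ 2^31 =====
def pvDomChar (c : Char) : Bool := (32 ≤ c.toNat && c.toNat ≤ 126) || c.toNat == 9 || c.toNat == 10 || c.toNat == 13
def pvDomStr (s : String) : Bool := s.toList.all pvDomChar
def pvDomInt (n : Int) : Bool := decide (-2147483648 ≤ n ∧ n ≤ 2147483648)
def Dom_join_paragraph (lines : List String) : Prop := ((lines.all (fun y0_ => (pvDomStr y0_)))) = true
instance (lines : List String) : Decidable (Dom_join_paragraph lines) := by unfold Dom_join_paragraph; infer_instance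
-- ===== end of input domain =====

-- B rebuilds the paragraph as a strip/filter pass followed by one ''.join whose per-line
-- separator is derived from that line's own trailing character, instead of A's repeated
-- rewriting of parts[-1] driven by the accumulated string's last character.

-- ===== PORT A =====
-- one iteration of A's `for raw in lines` loop over the mutable `parts` list
def pvStepA (parts : List (List Char)) (raw : String) : List (List Char) :=
  let s := PySem.Chars.strip raw.toList
  if s = [] then parts
  else if parts = [] then parts ++ [s]
  else
    let prev := parts.getLastD []          -- parts[-1] (parts is nonempty here)
    if PySem.Chars.endswith prev ['-'] then
      parts.dropLast ++ [PySem.Chars.slice prev none (some (-1)) ++ s]   -- parts[-1] = prev[:-1] + s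
    else
      parts.dropLast ++ [prev ++ [' '] ++ s]                             -- parts[-1] = prev + " " + s

def join_paragraph (lines : List String) : String :=
  let parts := lines.foldl pvStepA []
  String.mk (parts.headD [])               -- parts[0] if parts else ""

-- ===== PORT B =====
-- cleaned = [s for s in (l.strip() for l in lines) if s]
def pvCleanB (lines : List String) : List (List Char) :=
  (lines.map (fun l => PySem.Chars.strip l.toList)).filter (fun s => decide (s ≠ []))

-- the loop over `enumerate(cleaned)` emitting each piece (last line kept verbatim)
def pvTokensB : List (List Char) → List (List Char)
  | [] => []
  | [s] => [s]
  | s :: rest =>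
      (if PySem.Chars.endswith s ['-'] then PySem.Chars.slice s none (some (-1))
       else s ++ [' ']) :: pvTokensB rest

def join_paragraph_alt (lines : List String) : String :=
  String.mk (PySem.Chars.join [] (pvTokensB (pvCleanB lines)))   -- ''.join(pieces)

-- ===== PRECONDITION & SPEC =====
def Spec_join_paragraph (lines : List String) (out : String) : Prop := out = join_paragraph_alt lines
instance (lines : List String) (out : String) : Decidable (Spec_join_paragraph lines out) := by unfold Spec_join_paragraph; infer_instance

-- ===== CLAIM (what is proved, stated in full; the proofs are below) =====
def Claim_equal_join_paragraph : Prop := ∀ (lines : List String), Dom_join_paragraph lines → Spec_join_paragraph lines (join_paragraph lines)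

-- ===== LEMMAS AND PROOFS =====

-- A's merge of the next stripped line into the accumulated paragraph
def pvMergeA (acc s : List Char) : List Char :=
  if PySem.Chars.endswith acc ['-'] then PySem.Chars.slice acc none (some (-1)) ++ s
  else acc ++ [' '] ++ s

-- B's piece for a non-final line
def pvTokB (s : List Char) : List Char :=
  if PySem.Chars.endswith s ['-'] then PySem.Chars.slice s none (some (-1)) else s ++ [' ']

lemma pvTokensB_cons₂ (s t : List Char) (r : List (List Char)) :
    pvTokensB (s :: t :: r) = pvTokB s :: pvTokensB (t :: r) := rfl

lemma pv_slice_neg_one (s : List Char) :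
    PySem.List.slice s none (some (-1)) = s.dropLast := by
  simpa [pysem] using PySem.Str.slice_to_neg_one (String.mk s)

lemma pv_endswith_append (a s : List Char) (h : s ≠ []) :
    PySem.Chars.endswith (a ++ s) ['-'] = PySem.Chars.endswith s ['-'] := by
  rw [Bool.eq_iff_iff, PySem.Chars.endswith_iff, PySem.Chars.endswith_iff]
  constructor
  · rintro ⟨t, ht⟩
    rcases s.eq_nil_or_concat with rfl | ⟨s', c, rfl⟩
    · exact absurd rfl h
    · have hc : c = '-' := by
        have h2 := congrArg List.getLast? ht
        simp at h2
        exact h2.symm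
      exact ⟨s', by simp [hc, List.concat_eq_append]⟩
  · intro hs
    exact hs.trans (List.suffix_append a s)

lemma pvMergeA_eq (acc s : List Char) : pvMergeA acc s = pvTokB acc ++ s := by
  unfold pvMergeA pvTokB
  split_ifs <;> simp

lemma pvTokB_append (x s : List Char) (h : s ≠ []) :
    pvTokB (x ++ s) = x ++ pvTokB s := by
  unfold pvTokB
  rw [pv_endswith_append x s h]
  split_ifs with hw
  · simp [pysem, pv_slice_neg_one, List.dropLast_append_of_ne_nil h]
  · simp

lemma pv_join_nil_cons (x : List Char) (L : List (List Char)) :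
    PySem.Chars.join [] (x :: L) = x ++ PySem.Chars.join [] L := by
  cases L with
  | nil => simp [PySem.Chars.join_singleton, PySem.Chars.join_nil]
  | cons b l => simp [PySem.Chars.join_cons_cons]

lemma pv_fold_merge_eq_join (rest : List (List Char)) :
    ∀ acc : List Char, (∀ s ∈ rest, s ≠ []) →
      rest.foldl pvMergeA acc = PySem.Chars.join [] (pvTokensB (acc :: rest)) := by
  induction rest with
  | nil => intro acc _; simp [pvTokensB, PySem.Chars.join_singleton]
  | cons s rest ih =>
      intro acc hne
      have hs : s ≠ [] := hne s (List.mem_cons_self ..)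
      have hrest : ∀ t ∈ rest, t ≠ [] := fun t ht => hne t (List.mem_cons_of_mem _ ht)
      have step : List.foldl pvMergeA acc (s :: rest)
          = List.foldl pvMergeA (pvMergeA acc s) rest := rfl
      rw [step, ih (pvMergeA acc s) hrest, pvMergeA_eq]
      cases rest with
      | nil =>
          simp [pvTokensB, pvTokB, pv_join_nil_cons, PySem.Chars.join_singleton]
      | cons t r =>
          simp only [pvTokensB_cons₂, pv_join_nil_cons]
          rw [pvTokB_append _ _ hs]
          simp

lemma pv_foldA_singleton (lines : List String) :
    ∀ acc : List Char,
      lines.foldl pvStepA [acc] = [(pvCleanB lines).foldl pvMergeA acc] := by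
  induction lines with
  | nil => intro acc; simp [pvCleanB]
  | cons raw rest ih =>
      intro acc
      by_cases hs : PySem.Chars.strip raw.toList = []
      · have hstep : pvStepA [acc] raw = [acc] := by simp [pvStepA, hs]
        have hclean : pvCleanB (raw :: rest) = pvCleanB rest := by
          simp [pvCleanB, hs]
        rw [List.foldl_cons, hstep, ih acc, hclean]
      · have hstep : pvStepA [acc] raw = [pvMergeA acc (PySem.Chars.strip raw.toList)] := by
          simp [pvStepA, hs, pvMergeA]
          split_ifs <;> rfl
        have hclean : pvCleanB (raw :: rest)
            = PySem.Chars.strip raw.toList :: pvCleanB rest := by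
          simp [pvCleanB, hs]
        rw [List.foldl_cons, hstep, ih, hclean, List.foldl_cons]

lemma pv_foldA (lines : List String) :
    lines.foldl pvStepA [] =
      match pvCleanB lines with
      | [] => []
      | c :: cs => [cs.foldl pvMergeA c] := by
  induction lines with
  | nil => simp [pvCleanB]
  | cons raw rest ih =>
      by_cases hs : PySem.Chars.strip raw.toList = []
      · have hclean : pvCleanB (raw :: rest) = pvCleanB rest := by
          simp [pvCleanB, hs]
        have hstep : pvStepA [] raw = [] := by simp [pvStepA, hs]
        rw [List.foldl_cons, hstep, ih, hclean]
      · have hclean : pvCleanB (raw :: rest)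
            = PySem.Chars.strip raw.toList :: pvCleanB rest := by
          simp [pvCleanB, hs]
        have hstep : pvStepA [] raw = [PySem.Chars.strip raw.toList] := by
          simp [pvStepA, hs]
        rw [List.foldl_cons, hstep, hclean, pv_foldA_singleton]

lemma pv_clean_ne_nil (lines : List String) : ∀ s ∈ pvCleanB lines, s ≠ [] := by
  intro s hs
  have := List.of_mem_filter hs
  simpa using this

lemma pv_main (lines : List String) : join_paragraph lines = join_paragraph_alt lines := by
  unfold join_paragraph join_paragraph_alt
  rw [pv_foldA]
  cases hc : pvCleanB lines with
  | nil => simp [pvTokensB, PySem.Chars.join_nil]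
  | cons c cs =>
      have hne : ∀ s ∈ cs, s ≠ [] := fun s hs =>
        pv_clean_ne_nil lines s (hc ▸ List.mem_cons_of_mem _ hs)
      simp [pv_fold_merge_eq_join cs c hne]

-- ===== VERDICT (by name: the statement is the Claim_ definition above) =====
theorem join_paragraph_spec : Claim_equal_join_paragraph := by
  intro lines _
  unfold Spec_join_paragraph
  exact pv_main lines
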